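-- pv_equiv track=rewrite | github.com/Brettler/Genetic_Algorithm-mono_cipher_alphabetic | main.py | decipher_text
-- ===== SOURCE A (Python) =====
-- def decipher_text(solution, enc_text):
--     # Initialize an empty string to store the deciphered text
--     deciphered = ""
--     # Iterate over each character in the encrypted text
--     for char in enc_text:
--         # Check if the uppercase version of the character is in the solution dictionary.
--         if char.upper() in dict(solution):
--             # If the character is uppercase, add the deciphered uppercase character to the deciphered string
--             if char.isupper():
--                 deciphered += dict(solution)[char]
--             # If the character is lowercase, add the deciphered lowercase character to the deciphered string
--             else:
--             # If the character is not in the solution dictionary (e.g., punctuation or whitespace), add it as-is to the deciphered string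
--                 deciphered += dict(solution)[char.upper()].lower()
--         else:
--             deciphered += char
--     # Return the complete deciphered text
--     return deciphered
-- ===== SOURCE B (Python) =====
-- def decipher_text(solution, enc_text):
--     # Build a char-level translation table ONCE, covering both cases up front
--     # (A rebuilds dict(solution) and re-does the case analysis for every character).
--     table = {}
--     for key, value in dict(solution).items():
--         if len(key) == 1 and key == key.upper():
--             table[key.lower()] = value.lower()
--             if key != key.lower():
--                 table[key] = value
--     return "".join(table.get(c, c) for c in enc_text)
-- ===== Notes on version B (the rewrite author's own statement) =====
-- stated objective: faster
-- what changed: B precomputes a char-level translation table once (one entry per letter case, with the case analysis done at table-build time), then the text loop is a single branch-free dict lookup per character; A rebuilds dict(solution) up to three times per character and redoes the upper/lower case analysis inside the loop.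
import Mathlib
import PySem

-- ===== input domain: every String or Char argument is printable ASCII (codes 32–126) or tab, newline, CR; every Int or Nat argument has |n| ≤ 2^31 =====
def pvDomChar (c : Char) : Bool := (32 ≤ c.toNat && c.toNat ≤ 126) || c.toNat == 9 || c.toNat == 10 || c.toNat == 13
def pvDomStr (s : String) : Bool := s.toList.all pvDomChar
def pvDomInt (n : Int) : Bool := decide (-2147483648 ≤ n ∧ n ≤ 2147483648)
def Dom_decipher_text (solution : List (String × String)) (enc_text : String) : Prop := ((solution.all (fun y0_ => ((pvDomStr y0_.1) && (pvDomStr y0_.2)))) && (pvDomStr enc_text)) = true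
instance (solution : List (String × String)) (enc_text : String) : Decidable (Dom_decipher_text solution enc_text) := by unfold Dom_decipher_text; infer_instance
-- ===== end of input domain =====

-- B precomputes a char-level translation table covering both letter cases once, so the text loop is a bare table lookup; A rebuilds dict(solution) and redoes the case analysis per character (objective: faster).

-- ===== PORT A =====
-- A: deciphered = ""; for char in enc_text: rebuild dict(solution) for each test/lookup, append via +=.
def decipher_text (solution : List (String × String)) (enc_text : String) : String :=
  String.ofList (enc_text.toList.foldl (fun deciphered char =>
    if (PySem.Dict.ofList solution).contains (String.ofList [PySem.Chars.upperChar char]) then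
      if PySem.Chars.isupper char then
        deciphered ++ (((PySem.Dict.ofList solution).get? (String.ofList [char])).getD "").toList
      else
        deciphered ++ PySem.Chars.lower ((((PySem.Dict.ofList solution).get? (String.ofList [PySem.Chars.upperChar char])).getD "").toList)
    else
      deciphered ++ [char]) [])

-- ===== PORT B =====
-- B's table-building loop body: for key, value in solution: if len(key)==1 and key==key.upper(): table[key.lower()]=value.lower(); if key!=key.lower(): table[key]=value
def pvTableStep (table : PySem.Dict String String) (kv : String × String) : PySem.Dict String String :=
  if PySem.Str.len kv.1 = 1 ∧ kv.1 = PySem.Str.upper kv.1 then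
    let t1 := table.insert (PySem.Str.lower kv.1) (PySem.Str.lower kv.2)
    if kv.1 ≠ PySem.Str.lower kv.1 then t1.insert kv.1 kv.2 else t1
  else table

-- B: build the table once from dict(solution).items(), then "".join(table.get(c, c) for c in enc_text)
def decipher_text_alt (solution : List (String × String)) (enc_text : String) : String :=
  let table := (PySem.Dict.ofList solution).items.foldl pvTableStep PySem.Dict.empty
  PySem.Str.join "" (enc_text.toList.map (fun c => table.getD (String.ofList [c]) (String.ofList [c])))

-- ===== PRECONDITION & SPEC =====
def Spec_decipher_text (solution : List (String × String)) (enc_text : String) (out : String) : Prop := out = decipher_text_alt solution enc_text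
instance (solution : List (String × String)) (enc_text : String) (out : String) : Decidable (Spec_decipher_text solution enc_text out) := by unfold Spec_decipher_text; infer_instance

-- ===== CLAIM (what is proved, stated in full; the proofs are below) =====
def Claim_equal_decipher_text : Prop := ∀ (solution : List (String × String)) (enc_text : String), Dom_decipher_text solution enc_text → Spec_decipher_text solution enc_text (decipher_text solution enc_text)

-- ===== LEMMAS AND PROOFS =====

-- --- small character facts (ASCII case arithmetic) ---

theorem pv_isupper_iff (c : Char) : PySem.Chars.isupper c = true ↔ 65 ≤ c.toNat ∧ c.toNat ≤ 90 := by
  simp [PySem.Chars.isupper, Char.le_def]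
  constructor
  · rintro ⟨h1, h2⟩; exact ⟨by exact_mod_cast h1, by exact_mod_cast h2⟩
  · rintro ⟨h1, h2⟩; exact ⟨by exact_mod_cast h1, by exact_mod_cast h2⟩

theorem pv_islower_iff (c : Char) : PySem.Chars.islower c = true ↔ 97 ≤ c.toNat ∧ c.toNat ≤ 122 := by
  simp [PySem.Chars.islower, Char.le_def]
  constructor
  · rintro ⟨h1, h2⟩; exact ⟨by exact_mod_cast h1, by exact_mod_cast h2⟩
  · rintro ⟨h1, h2⟩; exact ⟨by exact_mod_cast h1, by exact_mod_cast h2⟩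

theorem pv_upperChar_of_not_lower (c : Char) (h : PySem.Chars.islower c = false) :
    PySem.Chars.upperChar c = c := by
  simp [PySem.Chars.upperChar, h]

theorem pv_lowerChar_of_not_upper (c : Char) (h : PySem.Chars.isupper c = false) :
    PySem.Chars.lowerChar c = c := by
  simp [PySem.Chars.lowerChar, h]

theorem pv_not_lower_of_upper (c : Char) (h : PySem.Chars.isupper c = true) :
    PySem.Chars.islower c = false := by
  rw [pv_isupper_iff] at h
  by_contra hc
  rw [Bool.not_eq_false, pv_islower_iff] at hc
  omega

theorem pv_toNat_upperChar_of_lower (c : Char) (h : PySem.Chars.islower c = true) :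
    (PySem.Chars.upperChar c).toNat = c.toNat - 32 := by
  have hb := (pv_islower_iff c).mp h
  simp [PySem.Chars.upperChar, h]
  rw [Char.toNat_ofNat]
  have : (c.toNat - 32).isValidChar := Or.inl (by omega)
  simp [this]

theorem pv_toNat_lowerChar_of_upper (c : Char) (h : PySem.Chars.isupper c = true) :
    (PySem.Chars.lowerChar c).toNat = c.toNat + 32 := by
  have hb := (pv_isupper_iff c).mp h
  simp [PySem.Chars.lowerChar, h]
  rw [Char.toNat_ofNat]
  have : (c.toNat + 32).isValidChar := Or.inl (by omega)
  simp [this]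

theorem pv_char_eq_of_toNat (c d : Char) (h : c.toNat = d.toNat) : c = d :=
  Char.ext (by exact UInt32.toNat_inj.mp h)

theorem pv_lowerChar_ne_of_upper (c : Char) (h : PySem.Chars.isupper c = true) :
    PySem.Chars.lowerChar c ≠ c := by
  intro he
  have := pv_toNat_lowerChar_of_upper c h
  rw [he] at this
  omega

theorem pv_isupper_lowerChar (c : Char) (h : PySem.Chars.isupper c = true) :
    PySem.Chars.isupper (PySem.Chars.lowerChar c) = false := by
  have hb := (pv_isupper_iff c).mp h
  have ht := pv_toNat_lowerChar_of_upper c h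
  by_contra hc
  rw [Bool.not_eq_false, pv_isupper_iff, ht] at hc
  omega

theorem pv_islower_lowerChar (c : Char) (h : PySem.Chars.isupper c = true) :
    PySem.Chars.islower (PySem.Chars.lowerChar c) = true := by
  have hb := (pv_isupper_iff c).mp h
  rw [pv_islower_iff, pv_toNat_lowerChar_of_upper c h]
  omega

theorem pv_upperChar_lowerChar (c : Char) (h : PySem.Chars.isupper c = true) :
    PySem.Chars.upperChar (PySem.Chars.lowerChar c) = c := by
  apply pv_char_eq_of_toNat
  have hb := (pv_isupper_iff c).mp h
  rw [pv_toNat_upperChar_of_lower _ (pv_islower_lowerChar c h), pv_toNat_lowerChar_of_upper c h]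
  omega

theorem pv_lowerChar_upperChar (c : Char) (h : PySem.Chars.islower c = true) :
    PySem.Chars.lowerChar (PySem.Chars.upperChar c) = c := by
  apply pv_char_eq_of_toNat
  have hb := (pv_islower_iff c).mp h
  have hu : PySem.Chars.isupper (PySem.Chars.upperChar c) = true := by
    rw [pv_isupper_iff, pv_toNat_upperChar_of_lower c h]; omega
  rw [pv_toNat_lowerChar_of_upper _ hu, pv_toNat_upperChar_of_lower c h]
  omega

theorem pv_islower_upperChar (c : Char) : PySem.Chars.islower (PySem.Chars.upperChar c) = false := by
  by_cases h : PySem.Chars.islower c = true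
  · have hb := (pv_islower_iff c).mp h
    by_contra hc
    rw [Bool.not_eq_false, pv_islower_iff, pv_toNat_upperChar_of_lower c h] at hc
    omega
  · rw [pv_upperChar_of_not_lower c (by simpa using h)]
    simpa using h

theorem pv_ofList_inj {s t : List Char} (h : String.ofList s = String.ofList t) : s = t := by
  have := congrArg String.toList h
  simpa using this

theorem pv_string_eq_of_toList {s t : String} (h : s.toList = t.toList) : s = t := by
  have h2 := congrArg String.ofList h
  simpa [String.ofList_toList] using h2

-- --- the per-character value A produces, as a function of the dict ---
def pvAChar (m : PySem.Dict String String) (c : Char) : List Char :=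
  if m.contains (String.ofList [PySem.Chars.upperChar c]) then
    if PySem.Chars.isupper c then ((m.get? (String.ofList [c])).getD "").toList
    else PySem.Chars.lower (((m.get? (String.ofList [PySem.Chars.upperChar c])).getD "").toList)
  else [c]

theorem pv_foldl_A (m : PySem.Dict String String) (cs : List Char) (acc : List Char) :
    cs.foldl (fun deciphered char =>
      if m.contains (String.ofList [PySem.Chars.upperChar char]) then
        if PySem.Chars.isupper char then
          deciphered ++ ((m.get? (String.ofList [char])).getD "").toList
        else
          deciphered ++ PySem.Chars.lower (((m.get? (String.ofList [PySem.Chars.upperChar char])).getD "").toList)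
      else
        deciphered ++ [char]) acc
    = acc ++ (cs.map (pvAChar m)).flatten := by
  induction cs generalizing acc with
  | nil => simp
  | cons c cs ih =>
    rw [List.foldl_cons]
    have hstep : (if m.contains (String.ofList [PySem.Chars.upperChar c]) then
        if PySem.Chars.isupper c then
          acc ++ ((m.get? (String.ofList [c])).getD "").toList
        else
          acc ++ PySem.Chars.lower (((m.get? (String.ofList [PySem.Chars.upperChar c])).getD "").toList)
      else
        acc ++ [c]) = acc ++ pvAChar m c := by
      unfold pvAChar; split_ifs <;> rfl
    rw [hstep, ih]
    simp

theorem pv_join_nil_eq_flatten : ∀ ps : List (List Char), PySem.Chars.join [] ps = ps.flatten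
  | [] => rfl
  | [p] => by simp [PySem.Chars.join, List.intercalate]
  | p :: q :: ps => by
      have ih := pv_join_nil_eq_flatten (q :: ps)
      have step : PySem.Chars.join [] (p :: q :: ps) = p ++ PySem.Chars.join [] (q :: ps) := by
        simp [PySem.Chars.join, List.intercalate, List.intersperse]
      rw [step, ih]
      simp

-- --- invariant relating B's table to dict(solution) ---
def pvGood (t m : PySem.Dict String String) : Prop := ∀ c : Char,
  t.get? (String.ofList [c]) =
    if PySem.Chars.isupper c then m.get? (String.ofList [c])
    else (m.get? (String.ofList [PySem.Chars.upperChar c])).map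
      (fun v => String.ofList (PySem.Chars.lower v.toList))

theorem pv_good_empty : pvGood PySem.Dict.empty PySem.Dict.empty := by
  intro c
  simp [PySem.Dict.get?_empty]

theorem pv_good_step (t m : PySem.Dict String String) (kv : String × String)
    (h : pvGood t m) : pvGood (pvTableStep t kv) (m.insert kv.1 kv.2) := by
  obtain ⟨key, value⟩ := kv
  intro c
  have hul : PySem.Chars.islower (PySem.Chars.upperChar c) = false := pv_islower_upperChar c
  by_cases hcond : PySem.Str.len key = 1 ∧ key = PySem.Str.upper key
  · -- key is a single char equal to its own uppercase
    obtain ⟨hlen, hupk⟩ := hcond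
    have hlen' : key.toList.length = 1 := by
      have := hlen
      rw [PySem.Str.len_eq] at this
      exact_mod_cast this
    obtain ⟨k, hk⟩ : ∃ k, key.toList = [k] := by
      cases hks : key.toList with
      | nil => rw [hks] at hlen'; simp at hlen'
      | cons a l =>
        rw [hks] at hlen'
        simp at hlen'
        exact ⟨a, by simp [hlen']⟩
    have hkey : key = String.ofList [k] := by
      apply pv_string_eq_of_toList; simp [hk]
    have hupk' : k = PySem.Chars.upperChar k := by
      have h2 := congrArg String.toList hupk
      simp [PySem.Str.upper] at h2
      rw [hk] at h2
      simp [PySem.Chars.upper] at h2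
      exact h2
    have hknl : PySem.Chars.islower k = false := by
      by_contra hc
      rw [Bool.not_eq_false] at hc
      have := pv_toNat_upperChar_of_lower k hc
      rw [← hupk'] at this
      have hb := (pv_islower_iff k).mp hc
      omega
    have hlowkey : PySem.Str.lower key = String.ofList [PySem.Chars.lowerChar k] := by
      apply pv_string_eq_of_toList
      simp [PySem.Str.lower, hk, PySem.Chars.lower]
    rw [show pvTableStep t (key, value) =
        (if PySem.Str.len key = 1 ∧ key = PySem.Str.upper key then
          let t1 := t.insert (PySem.Str.lower key) (PySem.Str.lower value)
          if key ≠ PySem.Str.lower key then t1.insert key value else t1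
        else t) from rfl]
    rw [if_pos ⟨hlen, hupk⟩]
    by_cases hkup : PySem.Chars.isupper k = true
    · -- uppercase letter key: two entries
      have hne : key ≠ PySem.Str.lower key := by
        rw [hlowkey, hkey]
        intro he
        exact pv_lowerChar_ne_of_upper k hkup (List.head_eq_of_cons_eq (pv_ofList_inj he)).symm
      simp only [hne, if_true, ne_eq, not_false_iff]
      by_cases hc : PySem.Chars.isupper c = true
      · -- c uppercase: lookup at [c]
        simp only [hc, if_true]
        by_cases hck : c = k
        · subst hck
          rw [← hkey, PySem.Dict.get?_insert_self, PySem.Dict.get?_insert_self]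
        · have h1 : String.ofList [c] ≠ key := by
            rw [hkey]; intro he; exact hck (List.head_eq_of_cons_eq (pv_ofList_inj he))
          have h2 : String.ofList [c] ≠ PySem.Str.lower key := by
            rw [hlowkey]; intro he
            have := List.head_eq_of_cons_eq (pv_ofList_inj he)
            rw [this] at hc
            rw [pv_isupper_lowerChar k hkup] at hc
            exact Bool.false_ne_true hc
          rw [PySem.Dict.get?_insert_of_ne _ _ h1, PySem.Dict.get?_insert_of_ne _ _ h2,
              PySem.Dict.get?_insert_of_ne _ _ h1]
          have := h c
          simpa [hc] using this
      · -- c not uppercase: lookup at [c] on t-side, [upperChar c] on m-side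
        simp only [hc]
        by_cases hck : c = PySem.Chars.lowerChar k
        · subst hck
          have hup : PySem.Chars.upperChar (PySem.Chars.lowerChar k) = k :=
            pv_upperChar_lowerChar k hkup
          have h1 : String.ofList [PySem.Chars.lowerChar k] ≠ key := by
            rw [hkey]; intro he
            exact pv_lowerChar_ne_of_upper k hkup (List.head_eq_of_cons_eq (pv_ofList_inj he))
          rw [PySem.Dict.get?_insert_of_ne _ _ h1, ← hlowkey]
          rw [PySem.Dict.get?_insert_self]
          rw [hup, ← hkey, PySem.Dict.get?_insert_self]
          simp [PySem.Str.lower]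
        · have h1 : String.ofList [c] ≠ key := by
            rw [hkey]; intro he
            have := List.head_eq_of_cons_eq (pv_ofList_inj he)
            rw [this] at hc; rw [hkup] at hc; exact hc rfl
          have h2 : String.ofList [c] ≠ PySem.Str.lower key := by
            rw [hlowkey]; intro he
            exact hck (List.head_eq_of_cons_eq (pv_ofList_inj he))
          have h3 : String.ofList [PySem.Chars.upperChar c] ≠ key := by
            rw [hkey]; intro he
            have heq := List.head_eq_of_cons_eq (pv_ofList_inj he)
            by_cases hlc : PySem.Chars.islower c = true
            · exact hck (by rw [← heq, pv_lowerChar_upperChar c hlc])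
            · rw [pv_upperChar_of_not_lower c (by simpa using hlc)] at heq
              rw [heq, hkup] at hc
              exact hc rfl
          rw [PySem.Dict.get?_insert_of_ne _ _ h1, PySem.Dict.get?_insert_of_ne _ _ h2,
              PySem.Dict.get?_insert_of_ne _ _ h3]
          have := h c
          simpa [hc] using this
    · -- non-letter key (k = upper k, not uppercase): one entry, key.lower() == key
      have hlowk : PySem.Chars.lowerChar k = k := pv_lowerChar_of_not_upper k (by simpa using hkup)
      have heqlow : key = PySem.Str.lower key := by
        rw [hlowkey, hlowk, hkey]
      have hcond2 : ¬ (key ≠ PySem.Str.lower key) := by rw [← heqlow]; simp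
      simp only [hcond2, if_false]
      rw [← heqlow]
      by_cases hc : PySem.Chars.isupper c = true
      · simp only [hc, if_true]
        have h1 : String.ofList [c] ≠ key := by
          rw [hkey]; intro he
          have heq := List.head_eq_of_cons_eq (pv_ofList_inj he)
          rw [heq] at hc; exact hkup hc
        rw [PySem.Dict.get?_insert_of_ne _ _ h1, PySem.Dict.get?_insert_of_ne _ _ h1]
        have := h c
        simpa [hc] using this
      · simp only [hc]
        by_cases hck : c = k
        · subst hck
          have hupc : PySem.Chars.upperChar c = c := by rw [← hupk']
          rw [hupc, ← hkey, PySem.Dict.get?_insert_self, PySem.Dict.get?_insert_self]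
          simp [PySem.Str.lower]
        · have h1 : String.ofList [c] ≠ key := by
            rw [hkey]; intro he; exact hck (List.head_eq_of_cons_eq (pv_ofList_inj he))
          have h3 : String.ofList [PySem.Chars.upperChar c] ≠ key := by
            rw [hkey]; intro he
            have heq := List.head_eq_of_cons_eq (pv_ofList_inj he)
            by_cases hlc : PySem.Chars.islower c = true
            · have : PySem.Chars.isupper (PySem.Chars.upperChar c) = true := by
                rw [pv_isupper_iff, pv_toNat_upperChar_of_lower c hlc]
                have := (pv_islower_iff c).mp hlc
                omega
              rw [heq] at this
              exact hkup this
            · rw [pv_upperChar_of_not_lower c (by simpa using hlc)] at heq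
              exact hck heq
          rw [PySem.Dict.get?_insert_of_ne _ _ h1, PySem.Dict.get?_insert_of_ne _ _ h3]
          have := h c
          simpa [hc] using this
  · -- key does not qualify: table unchanged; key cannot be any string B or A looks up
    rw [show pvTableStep t (key, value) =
        (if PySem.Str.len key = 1 ∧ key = PySem.Str.upper key then
          let t1 := t.insert (PySem.Str.lower key) (PySem.Str.lower value)
          if key ≠ PySem.Str.lower key then t1.insert key value else t1
        else t) from rfl]
    rw [if_neg hcond]
    have hne : ∀ d : Char, PySem.Chars.islower d = false → String.ofList [d] ≠ key := by
      intro d hd he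
      apply hcond
      constructor
      · rw [← he]; simp [PySem.Str.len_eq]
      · rw [← he]
        apply pv_string_eq_of_toList
        simp [PySem.Str.upper, PySem.Chars.upper, pv_upperChar_of_not_lower d hd]
    have hc := h c
    by_cases hcc : PySem.Chars.isupper c = true
    · have hnl : PySem.Chars.islower c = false := pv_not_lower_of_upper c hcc
      rw [PySem.Dict.get?_insert_of_ne _ _ (hne c hnl)]
      simpa [hcc] using hc
    · rw [PySem.Dict.get?_insert_of_ne _ _ (hne (PySem.Chars.upperChar c) hul)]
      simpa [hcc] using hc

theorem pv_good_fold (sol : List (String × String)) :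
    ∀ (t m : PySem.Dict String String), pvGood t m →
    pvGood (sol.foldl pvTableStep t) (sol.foldl (fun d p => d.insert p.1 p.2) m) := by
  induction sol with
  | nil => intro t m h; simpa using h
  | cons kv rest ih =>
    intro t m h
    exact ih _ _ (pv_good_step t m kv h)

-- rebuilding a nodup-keys dict from its own items gives the dict back
theorem pv_ofList_items_eq (d : PySem.Dict String String) (h : d.keys.Nodup) :
    PySem.Dict.ofList d.items = d := by
  apply PySem.Dict.ext
  show (d.items.foldl (fun acc p => acc.insert p.1 p.2) PySem.Dict.empty).items = d.items
  rw [PySem.Dict.items_foldl_insert_fresh (k := Prod.fst) (v := Prod.snd)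
    (d := PySem.Dict.empty) (l := d.items)
    (fun a _ => PySem.Dict.contains_empty a.1) (by simpa [PySem.Dict.keys] using h)]
  simp [PySem.Dict.empty]

theorem pv_good_table (sol : List (String × String)) :
    pvGood ((PySem.Dict.ofList sol).items.foldl pvTableStep PySem.Dict.empty)
      (PySem.Dict.ofList sol) := by
  have := pv_good_fold (PySem.Dict.ofList sol).items PySem.Dict.empty PySem.Dict.empty pv_good_empty
  have hre := pv_ofList_items_eq (PySem.Dict.ofList sol) (PySem.Dict.nodup_keys_ofList sol)
  rw [show PySem.Dict.ofList (PySem.Dict.ofList sol).items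
      = (PySem.Dict.ofList sol).items.foldl (fun d p => d.insert p.1 p.2) PySem.Dict.empty from rfl] at hre
  rwa [hre] at this

-- per-character agreement: B's table lookup produces exactly A's per-character string
theorem pv_char_agree (sol : List (String × String)) (c : Char) :
    (((PySem.Dict.ofList sol).items.foldl pvTableStep PySem.Dict.empty).getD
        (String.ofList [c]) (String.ofList [c])).toList
      = pvAChar (PySem.Dict.ofList sol) c := by
  have hg := pv_good_table sol c
  set m := PySem.Dict.ofList sol
  set t := (PySem.Dict.ofList sol).items.foldl pvTableStep PySem.Dict.empty
  rw [PySem.Dict.getD_eq_get?_getD, hg]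
  by_cases hc : PySem.Chars.isupper c = true
  · have hup : PySem.Chars.upperChar c = c :=
      pv_upperChar_of_not_lower c (pv_not_lower_of_upper c hc)
    unfold pvAChar
    rw [hup, PySem.Dict.contains_eq_isSome_get?]
    cases hv : m.get? (String.ofList [c]) with
    | none => simp [hc]
    | some v => simp [hc]
  · unfold pvAChar
    rw [PySem.Dict.contains_eq_isSome_get?]
    cases hv : m.get? (String.ofList [PySem.Chars.upperChar c]) with
    | none => simp [hc]
    | some v => simp [hc]

-- ===== VERDICT (by name: the statement is the Claim_ definition above) =====
theorem decipher_text_spec : Claim_equal_decipher_text := by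
  intro solution enc_text _
  unfold Spec_decipher_text decipher_text decipher_text_alt
  rw [pv_foldl_A]
  apply pv_string_eq_of_toList
  rw [String.toList_ofList, PySem.Str.toList_join, show ("" : String).toList = [] from rfl,
    pv_join_nil_eq_flatten, List.map_map]
  simp only [List.nil_append, Function.comp_def]
  congr 1
  exact List.map_congr_left fun c _ => (pv_char_agree solution c).symm
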